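-- pv_equiv track=rewrite | github.com/yuewang001/python_project | fileManage/sortPicFile.py | iswhileYear
-- ===== SOURCE A (Python) =====
-- def  isStartwith(_file, _str):
--     if _file.startswith(_str):
--         return True
--     else:
--         return False
--
-- def iswhileYear(_file):
--
--     for year in range(2022,1980,-1):
--         _str="IMG_"+str(year)
--         if isStartwith(_file,_str):
--             return year
--         _str="VID_"+str(year)
--         if isStartwith(_file,_str):
--             return year
--     return 0
-- ===== SOURCE B (Python) =====
-- def iswhileYear(_file):
--     p = _file[:4]
--     if p == 'IMG_' or p == 'VID_':
--         d = _file[4:8]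
--         if len(d) == 4 and d.isascii() and d.isdigit():
--             y = (((ord(d[0]) * 10 + ord(d[1])) * 10 + ord(d[2])) * 10 + ord(d[3])) - 53328
--             if 1981 <= y <= 2022:
--                 return y
--     return 0
-- ===== Notes on version B (the rewrite author's own statement) =====
-- stated objective: faster
-- what changed: Replaced the 42-iteration scan over candidate year strings (building and prefix-testing up to 84 strings) by a single direct parse: check the IMG_/VID_ prefix once, read the 4 characters at positions 4..8 and convert them to a number arithmetically, then range-test 1981..2022.
import Mathlib
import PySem

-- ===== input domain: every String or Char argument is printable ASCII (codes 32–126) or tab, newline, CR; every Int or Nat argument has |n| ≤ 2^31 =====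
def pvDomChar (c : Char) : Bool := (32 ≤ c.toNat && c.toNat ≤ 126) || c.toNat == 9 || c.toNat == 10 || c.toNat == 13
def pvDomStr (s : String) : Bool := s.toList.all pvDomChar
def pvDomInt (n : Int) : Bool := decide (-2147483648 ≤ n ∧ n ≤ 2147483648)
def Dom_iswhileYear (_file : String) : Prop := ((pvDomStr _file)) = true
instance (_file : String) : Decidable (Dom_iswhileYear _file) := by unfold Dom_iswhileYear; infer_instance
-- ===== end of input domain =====

-- B replaces A's 42-iteration scan over candidate "IMG_<year>"/"VID_<year>" strings by a single
-- direct parse (prefix check + arithmetic on the four digit characters) — constant-factor faster.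


-- ===== PORT A =====
-- helper isStartwith, transliterated (the redundant if/else kept)
def isStartwith (_file : List Char) (_str : List Char) : Bool :=
  if PySem.Chars.startswith _file _str then true else false

-- the for-loop with its two early returns, as structural recursion over the year list
def iswhileYearGo (cs : List Char) : List Int → Int
  | [] => 0
  | year :: ys =>
    let s1 := ['I', 'M', 'G', '_'] ++ PySem.Int.toChars year      -- "IMG_" + str(year)
    if isStartwith cs s1 then year
    else
      let s2 := ['V', 'I', 'D', '_'] ++ PySem.Int.toChars year    -- "VID_" + str(year)
      if isStartwith cs s2 then year
      else iswhileYearGo cs ys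

def iswhileYear (_file : String) : Int :=
  iswhileYearGo _file.toList (PySem.List.pyRange 2022 1980 (-1))

-- ===== PORT B =====
-- transliteration of Source B: prefix check, slice [4:8], ascii+digit guard, arithmetic parse.
-- ord(c) is c.toNat (exact for every code point); d.isascii() is the hand-ported 'toNat ≤ 127' test.
def iswhileYear_alt (_file : String) : Int :=
  let cs := _file.toList
  let p := PySem.Chars.slice cs none (some 4)                     -- _file[:4]
  if p = ['I', 'M', 'G', '_'] ∨ p = ['V', 'I', 'D', '_'] then
    let d := PySem.Chars.slice cs (some 4) (some 8)               -- _file[4:8]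
    if d.length = 4 ∧ d.all (fun c => c.toNat ≤ 127) ∧ PySem.Chars.strIsdigit d then
      let y : Int :=
        (((((d.getD 0 ' ').toNat : Int) * 10 + ((d.getD 1 ' ').toNat : Int)) * 10
            + ((d.getD 2 ' ').toNat : Int)) * 10 + ((d.getD 3 ' ').toNat : Int)) - 53328
      if 1981 ≤ y ∧ y ≤ 2022 then y else 0
    else 0
  else 0

-- ===== PRECONDITION & SPEC =====
def Spec_iswhileYear (_file : String) (out : Int) : Prop := out = iswhileYear_alt _file
instance (_file : String) (out : Int) : Decidable (Spec_iswhileYear _file out) := by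
  unfold Spec_iswhileYear; infer_instance

-- ===== CLAIM (what is proved, stated in full; the proofs are below) =====
def Claim_equal_iswhileYear : Prop :=
  ∀ (_file : String), Dom_iswhileYear _file → Spec_iswhileYear _file (iswhileYear _file)

-- ===== LEMMAS AND PROOFS =====

-- the numeric value B computes from a digit list
def pvArith (d : List Char) : Int :=
  (((((d.getD 0 ' ').toNat : Int) * 10 + ((d.getD 1 ' ').toNat : Int)) * 10
      + ((d.getD 2 ' ').toNat : Int)) * 10 + ((d.getD 3 ' ').toNat : Int)) - 53328

-- startswith by an 8-char pattern splits into the two 4-char takes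
theorem pv_startswith_split (cs p q : List Char) (hp : p.length = 4) (hq : q.length = 4) :
    PySem.Chars.startswith cs (p ++ q) = true ↔
      cs.take 4 = p ∧ (cs.drop 4).take 4 = q := by
  rw [PySem.Chars.startswith_iff]
  constructor
  · intro h
    have hcslen : 8 ≤ cs.length := by
      have := h.length_le
      simp [hp, hq] at this
      omega
    have h8 : p ++ q = cs.take 8 := by
      have := List.prefix_iff_eq_take.mp h
      simpa [hp, hq] using this
    have hsplit : cs.take 8 = cs.take 4 ++ (cs.drop 4).take 4 := by
      simpa using (List.take_add (l := cs) (i := 4) (j := 4))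
    rw [hsplit] at h8
    have hlen : (cs.take 4).length = 4 := by
      rw [List.length_take]; omega
    obtain ⟨h1, h2⟩ := List.append_inj h8 (by omega)
    exact ⟨h1.symm, h2.symm⟩
  · rintro ⟨h1, h2⟩
    rw [List.prefix_iff_eq_take]
    have hsplit : cs.take 8 = cs.take 4 ++ (cs.drop 4).take 4 := by
      simpa using (List.take_add (l := cs) (i := 4) (j := 4))
    simp [hp, hq, hsplit, h1, h2]

-- facts about str(y) for y in 1981..2022
theorem pv_year_lit (y : Int) (h1 : 1981 ≤ y) (h2 : y ≤ 2022) :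
    (PySem.Int.toChars y).length = 4 ∧
    (PySem.Int.toChars y).all (fun c => c.toNat ≤ 127) = true ∧
    PySem.Chars.strIsdigit (PySem.Int.toChars y) = true ∧
    pvArith (PySem.Int.toChars y) = y := by
  interval_cases y <;> decide

theorem pv_char_eq_of_toNat (c d : Char) (h : c.toNat = d.toNat) : c = d := by
  rw [← Char.ofNat_toNat c, ← Char.ofNat_toNat d, h]

theorem pv_isdigit_bounds (c : Char) (h : PySem.Chars.isdigit c = true) :
    48 ≤ c.toNat ∧ c.toNat ≤ 57 := by
  simp only [PySem.Chars.isdigit, Bool.and_eq_true, decide_eq_true_eq] at h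
  obtain ⟨hl, hr⟩ := h
  exact ⟨hl, hr⟩

-- two 4-char digit lists with the same parsed value are equal
theorem pv_digit4_ext (d e : List Char) (hd : d.length = 4) (he : e.length = 4)
    (hdd : d.all PySem.Chars.isdigit = true) (hde : e.all PySem.Chars.isdigit = true)
    (hv : pvArith d = pvArith e) : d = e := by
  match d, e with
  | [a0, a1, a2, a3], [b0, b1, b2, b3] =>
    simp only [List.all_cons, List.all_nil, Bool.and_eq_true, Bool.and_true] at hdd hde
    obtain ⟨ha0, ha1, ha2, ha3⟩ := hdd
    obtain ⟨hb0, hb1, hb2, hb3⟩ := hde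
    have B0 := pv_isdigit_bounds _ ha0; have B1 := pv_isdigit_bounds _ ha1
    have B2 := pv_isdigit_bounds _ ha2; have B3 := pv_isdigit_bounds _ ha3
    have C0 := pv_isdigit_bounds _ hb0; have C1 := pv_isdigit_bounds _ hb1
    have C2 := pv_isdigit_bounds _ hb2; have C3 := pv_isdigit_bounds _ hb3
    simp only [pvArith, List.getD, List.getElem?_cons_zero, List.getElem?_cons_succ,
      Option.getD_some] at hv
    have e0 : a0.toNat = b0.toNat := by omega
    have e1 : a1.toNat = b1.toNat := by omega
    have e2 : a2.toNat = b2.toNat := by omega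
    have e3 : a3.toNat = b3.toNat := by omega
    rw [pv_char_eq_of_toNat _ _ e0, pv_char_eq_of_toNat _ _ e1,
        pv_char_eq_of_toNat _ _ e2, pv_char_eq_of_toNat _ _ e3]

-- a 4-char digit list whose parsed value y lies in 1981..2022 IS str(y)
theorem pv_digits_eq_toChars (d : List Char) (hd : d.length = 4)
    (hdd : d.all PySem.Chars.isdigit = true)
    (h1 : 1981 ≤ pvArith d) (h2 : pvArith d ≤ 2022) :
    d = PySem.Int.toChars (pvArith d) := by
  obtain ⟨hl, _, hdig, hv⟩ := pv_year_lit (pvArith d) h1 h2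
  have : (PySem.Int.toChars (pvArith d)).all PySem.Chars.isdigit = true := by
    simp only [PySem.Chars.strIsdigit, Bool.and_eq_true] at hdig
    exact hdig.2
  exact pv_digit4_ext d _ hd hl hdd this hv.symm

-- the loop returns 0 when no candidate matches
theorem pv_go_zero (cs : List Char) (ys : List Int)
    (h : ∀ y ∈ ys, isStartwith cs (['I','M','G','_'] ++ PySem.Int.toChars y) = false ∧
                   isStartwith cs (['V','I','D','_'] ++ PySem.Int.toChars y) = false) :
    iswhileYearGo cs ys = 0 := by
  induction ys with
  | nil => rfl
  | cons z zs ih =>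
    obtain ⟨h1, h2⟩ := h z (List.mem_cons_self)
    simp only [iswhileYearGo, h1, h2, Bool.false_eq_true, if_false]
    exact ih (fun y hy => h y (List.mem_cons_of_mem _ hy))

-- the loop returns y when y matches and is the only match in the list
theorem pv_go_mem (cs : List Char) (ys : List Int) (y : Int) (hy : y ∈ ys)
    (hm : isStartwith cs (['I','M','G','_'] ++ PySem.Int.toChars y) = true ∨
          isStartwith cs (['V','I','D','_'] ++ PySem.Int.toChars y) = true)
    (hu : ∀ y' ∈ ys,
        (isStartwith cs (['I','M','G','_'] ++ PySem.Int.toChars y') = true ∨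
         isStartwith cs (['V','I','D','_'] ++ PySem.Int.toChars y') = true) → y' = y) :
    iswhileYearGo cs ys = y := by
  induction ys with
  | nil => cases hy
  | cons z zs ih =>
    by_cases hz1 : isStartwith cs (['I','M','G','_'] ++ PySem.Int.toChars z) = true
    · have := hu z List.mem_cons_self (Or.inl hz1)
      simp only [iswhileYearGo, hz1, if_true]
      omega
    · by_cases hz2 : isStartwith cs (['V','I','D','_'] ++ PySem.Int.toChars z) = true
      · have := hu z List.mem_cons_self (Or.inr hz2)
        simp only [iswhileYearGo, hz1, hz2, Bool.false_eq_true, if_false, if_true]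
        omega
      · have hzy : z ≠ y := by
          intro hzy; subst hzy
          rcases hm with h | h
          · exact hz1 h
          · exact hz2 h
        have hy' : y ∈ zs := by
          rcases List.mem_cons.mp hy with h | h
          · exact absurd h.symm hzy
          · exact h
        simp only [iswhileYearGo, eq_false_of_ne_true hz1, eq_false_of_ne_true hz2,
          Bool.false_eq_true, if_false]
        exact ih hy' (fun y' hy'' hm' => hu y' (List.mem_cons_of_mem _ hy'') hm')

-- a match at year y (1981..2022) is exactly: prefix ok and d = str(y)
theorem pv_isStartwith_eq (cs p : List Char) :
    isStartwith cs p = PySem.Chars.startswith cs p := by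
  simp [isStartwith]

theorem pv_match_iff (cs : List Char) (y : Int) (h1 : 1981 ≤ y) (h2 : y ≤ 2022) :
    (isStartwith cs (['I','M','G','_'] ++ PySem.Int.toChars y) = true ∨
     isStartwith cs (['V','I','D','_'] ++ PySem.Int.toChars y) = true) ↔
    ((cs.take 4 = ['I','M','G','_'] ∨ cs.take 4 = ['V','I','D','_']) ∧
      (cs.drop 4).take 4 = PySem.Int.toChars y) := by
  obtain ⟨hl, -, -, -⟩ := pv_year_lit y h1 h2
  rw [pv_isStartwith_eq, pv_isStartwith_eq,
    pv_startswith_split cs _ _ (by decide) hl, pv_startswith_split cs _ _ (by decide) hl]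
  tauto

-- B expressed through take/drop
theorem pv_alt_eq (s : String) :
    iswhileYear_alt s =
      (if s.toList.take 4 = ['I','M','G','_'] ∨ s.toList.take 4 = ['V','I','D','_'] then
         if ((s.toList.drop 4).take 4).length = 4 ∧
             ((s.toList.drop 4).take 4).all (fun c => c.toNat ≤ 127) ∧
             PySem.Chars.strIsdigit ((s.toList.drop 4).take 4) then
           if 1981 ≤ pvArith ((s.toList.drop 4).take 4) ∧ pvArith ((s.toList.drop 4).take 4) ≤ 2022 then
             pvArith ((s.toList.drop 4).take 4)
           else 0
         else 0
       else 0) := by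
  have e1 : PySem.List.slice s.toList none (some 4) = s.toList.take (4:Int).toNat :=
    PySem.List.slice_to s.toList (by norm_num)
  have e2 : PySem.List.slice s.toList (some 4) (some 8) =
      (s.toList.drop (4:Int).toNat).take ((8:Int).toNat - (4:Int).toNat) :=
    PySem.List.slice_toNat s.toList (by norm_num) (by norm_num)
  simp only [iswhileYear_alt, pvArith, PySem.Chars.slice_eq_listSlice, e1, e2]
  rfl

-- ===== VERDICT (by name: the statement is the Claim_ definition above) =====
theorem iswhileYear_spec : Claim_equal_iswhileYear := by
  intro s _dom
  unfold Spec_iswhileYear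
  rw [pv_alt_eq]
  set cs := s.toList with hcs
  by_cases hex : ∃ y, 1980 < y ∧ y ≤ 2022 ∧
      (isStartwith cs (['I','M','G','_'] ++ PySem.Int.toChars y) = true ∨
       isStartwith cs (['V','I','D','_'] ++ PySem.Int.toChars y) = true)
  · obtain ⟨y, hy1, hy2, hym⟩ := hex
    have hy1' : 1981 ≤ y := by omega
    obtain ⟨hpre, hd⟩ := (pv_match_iff cs y hy1' hy2).mp hym
    obtain ⟨hl, hascii, hdig, hval⟩ := pv_year_lit y hy1' hy2
    have huniq : ∀ y' ∈ PySem.List.pyRange 2022 1980 (-1),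
        (isStartwith cs (['I','M','G','_'] ++ PySem.Int.toChars y') = true ∨
         isStartwith cs (['V','I','D','_'] ++ PySem.Int.toChars y') = true) → y' = y := by
      intro y' hy' hm'
      obtain ⟨hb1, hb2⟩ := (PySem.List.mem_pyRange_neg_one).mp hy'
      obtain ⟨_, hd'⟩ := (pv_match_iff cs y' (by omega) hb2).mp hm'
      have : PySem.Int.toChars y' = PySem.Int.toChars y := by rw [← hd', ← hd]
      have hv' := (pv_year_lit y' (by omega) hb2).2.2.2
      rw [this, hval] at hv'
      omega
    have hA : iswhileYear s = y := by
      unfold iswhileYear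
      exact pv_go_mem _ _ y (PySem.List.mem_pyRange_neg_one.mpr ⟨hy1, hy2⟩) hym huniq
    rw [hA, if_pos hpre, hd, if_pos ⟨hl, hascii, hdig⟩, hval, if_pos ⟨hy1', hy2⟩]
  · push Not at hex
    have hA : iswhileYear s = 0 := by
      unfold iswhileYear
      apply pv_go_zero
      intro y hy
      obtain ⟨hb1, hb2⟩ := (PySem.List.mem_pyRange_neg_one).mp hy
      have h := hex y hb1 hb2
      exact ⟨by simpa using h.1, by simpa using h.2⟩
    rw [hA]
    split_ifs with hpre hg hr
    · exfalso
      obtain ⟨hlen, _, hdig⟩ := hg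
      have hdd : ((cs.drop 4).take 4).all PySem.Chars.isdigit = true := by
        simp only [PySem.Chars.strIsdigit, Bool.and_eq_true] at hdig
        exact hdig.2
      have heq := pv_digits_eq_toChars _ hlen hdd hr.1 hr.2
      have hm := (pv_match_iff cs (pvArith ((cs.drop 4).take 4)) hr.1 hr.2).mpr ⟨hpre, heq⟩
      have h := hex _ (by omega) hr.2
      rcases hm with hm | hm
      · exact h.1 hm
      · exact h.2 hm
    · rfl
    · rfl
    · rfl
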